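-- pv_equiv track=rewrite | github.com/eskousbol/AdventOfCode2025 | q8/q8b.py | merge_circuits
-- ===== SOURCE A (Python) =====
-- def merge_circuits(circuits):
--   final_circuits = []
--   for circuit in circuits:
--     for i in range(len(final_circuits)):
--       final_circuit = final_circuits[i]
--       merged_circuit = circuit.intersection(final_circuit)
--       if len(merged_circuit) != 0:
--         final_circuits[i] = circuit.union(final_circuit)
--         break
--     else:
--       final_circuits.append(circuit)
--   return final_circuits
-- ===== SOURCE B (Python) =====
-- def merge_circuits(circuits):
--   # element -> minimum index of a final circuit containing it; the first
--   # overlapping final circuit is then min(owner[e] for e in circuit).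
--   final_circuits = []
--   owner = {}
--   for circuit in circuits:
--     idxs = [owner[e] for e in circuit if e in owner]
--     if idxs:
--       i = min(idxs)
--       final_circuits[i] = circuit.union(final_circuits[i])
--       for e in circuit:
--         if e not in owner or owner[e] > i:
--           owner[e] = i
--     else:
--       k = len(final_circuits)
--       final_circuits.append(circuit)
--       for e in circuit:
--         owner.setdefault(e, k)
--   return final_circuits
-- ===== Notes on version B (the rewrite author's own statement) =====
-- stated objective: alternative
-- what changed: Replaces A's inner scan that set-intersects the incoming circuit with every accumulated circuit by a map from element to the minimum index of a final circuit containing it, so the first overlapping index is the minimum of the map's values over the incoming circuit's own elements.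
import Mathlib
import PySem

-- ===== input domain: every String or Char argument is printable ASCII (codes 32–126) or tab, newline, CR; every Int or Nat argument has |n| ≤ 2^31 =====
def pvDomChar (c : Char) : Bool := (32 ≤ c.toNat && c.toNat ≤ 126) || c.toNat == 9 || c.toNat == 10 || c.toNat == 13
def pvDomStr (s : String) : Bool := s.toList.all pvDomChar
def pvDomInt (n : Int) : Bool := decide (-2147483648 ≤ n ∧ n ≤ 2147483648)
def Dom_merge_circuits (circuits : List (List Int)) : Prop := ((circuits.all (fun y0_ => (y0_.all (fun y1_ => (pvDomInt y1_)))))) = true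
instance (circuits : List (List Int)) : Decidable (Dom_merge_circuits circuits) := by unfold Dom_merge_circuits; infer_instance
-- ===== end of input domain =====

-- B replaces A's inner scan over all accumulated circuits by an element → minimum-containing-index
-- map, so each input circuit is placed by looking up its own elements only.

-- ===== PORT A =====
-- inner 'for i in range(len(final_circuits)): … if len(circuit & final_circuits[i]) != 0: break / else:'
def firstOverlapA (c : PySem.Set Int) : List (List Int) → Nat → Option Nat
  | [], _ => none
  | f :: rest, i =>
      if PySem.Set.len (PySem.Set.inter c f) ≠ 0 then some i
      else firstOverlapA c rest (i + 1)

def stepA (final : List (List Int)) (circuit : List Int) : List (List Int) :=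
  let c : PySem.Set Int := PySem.Set.ofList circuit   -- the argument is a Python set
  match firstOverlapA c final 0 with
  | some i => final.set i (PySem.Set.union c (final.getD i []))   -- final_circuits[i] = circuit.union(final_circuit)
  | none => final ++ [c]

def merge_circuits (circuits : List (List Int)) : List (List Int) :=
  circuits.foldl stepA []

-- ===== PORT B =====
-- 'for e in circuit: if e not in owner or owner[e] > i: owner[e] = i'
def ownMinUpd (i : Nat) (o : PySem.Dict Int Nat) (e : Int) : PySem.Dict Int Nat :=
  match o.get? e with
  | some j => if i < j then o.insert e i else o
  | none => o.insert e i

def stepB (st : List (List Int) × PySem.Dict Int Nat) (circuit : List Int) :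
    List (List Int) × PySem.Dict Int Nat :=
  let c : PySem.Set Int := PySem.Set.ofList circuit
  let idxs := c.filterMap (fun e => st.2.get? e)      -- [owner[e] for e in circuit if e in owner]
  match idxs.min? with
  | some i =>
      (st.1.set i (PySem.Set.union c (st.1.getD i [])),
       c.foldl (ownMinUpd i) st.2)
  | none =>
      let k := st.1.length
      (st.1 ++ [c], c.foldl (fun o e => o.setdefault e k) st.2)

def merge_circuits_alt (circuits : List (List Int)) : List (List Int) :=
  (circuits.foldl stepB ([], PySem.Dict.empty)).1

-- ===== PRECONDITION & SPEC =====
def Spec_merge_circuits (circuits : List (List Int)) (out : List (List Int)) : Prop := out = merge_circuits_alt circuits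
instance (circuits : List (List Int)) (out : List (List Int)) : Decidable (Spec_merge_circuits circuits out) := by unfold Spec_merge_circuits; infer_instance

-- ===== CLAIM (what is proved, stated in full; the proofs are below) =====
def Claim_equal_merge_circuits : Prop := ∀ (circuits : List (List Int)), Dom_merge_circuits circuits → Spec_merge_circuits circuits (merge_circuits circuits)

-- ===== LEMMAS AND PROOFS =====

-- first index of a member of `final` containing e (the intended meaning of B's owner map)
def ownSpec (e : Int) : List (List Int) → Option Nat
  | [] => none
  | f :: rest => if e ∈ f then some 0 else (ownSpec e rest).map (· + 1)

def OwnInv (final : List (List Int)) (o : PySem.Dict Int Nat) : Prop :=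
  ∀ e, o.get? e = ownSpec e final

theorem min?_zero (l : List Nat) (h : 0 ∈ l) : l.min? = some 0 := by
  rw [List.min?_eq_some_iff]; exact ⟨h, fun b _ => Nat.zero_le b⟩

theorem min?_map_succ (l : List Nat) : (l.map (· + 1)).min? = l.min?.map (· + 1) := by
  cases h : l.min? with
  | none => rw [List.min?_eq_none_iff] at h; simp [h]
  | some m =>
    rw [List.min?_eq_some_iff] at h
    simp only [Option.map_some]
    rw [List.min?_eq_some_iff]
    refine ⟨List.mem_map.2 ⟨m, h.1, rfl⟩, fun b hb => ?_⟩
    obtain ⟨a, ha, rfl⟩ := List.mem_map.1 hb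
    exact Nat.add_le_add_right (h.2 a ha) 1

theorem filterMap_map_succ (c : List Int) (g : Int → Option Nat) :
    c.filterMap (fun e => (g e).map (· + 1)) = (c.filterMap g).map (· + 1) := by
  induction c with
  | nil => rfl
  | cons x xs ih => cases hg : g x <;> simp [hg, ih]

theorem firstOverlapA_shift (c : PySem.Set Int) (l : List (List Int)) (i : Nat) :
    firstOverlapA c l i = (firstOverlapA c l 0).map (· + i) := by
  induction l generalizing i with
  | nil => rfl
  | cons f rest ih =>
    by_cases h : PySem.Set.len (PySem.Set.inter c f) ≠ 0
    · rw [firstOverlapA, if_pos h, firstOverlapA, if_pos h]; simp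
    · rw [firstOverlapA, if_neg h, firstOverlapA, if_neg h]
      rw [ih (i + 1), ih 1]
      cases firstOverlapA c rest 0 with
      | none => rfl
      | some m => simp; omega

theorem overlap_iff (c : PySem.Set Int) (f : List Int) :
    PySem.Set.len (PySem.Set.inter c f) ≠ 0 ↔ ∃ e ∈ c, e ∈ f := by
  have hlen : PySem.Set.len (PySem.Set.inter c f) ≠ 0 ↔ PySem.Set.inter c f ≠ [] := by
    simp [PySem.Set.len]
  rw [hlen]
  constructor
  · intro h
    rcases List.exists_mem_of_ne_nil _ h with ⟨x, hx⟩
    exact ⟨x, (PySem.Set.mem_inter c f x).1 hx |>.1, (PySem.Set.mem_inter c f x).1 hx |>.2⟩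
  · rintro ⟨e, he, hef⟩ hnil
    have : e ∈ PySem.Set.inter c f := (PySem.Set.mem_inter c f e).2 ⟨he, hef⟩
    rw [hnil] at this
    simp at this

theorem key_min (c : PySem.Set Int) (final : List (List Int)) :
    (c.filterMap (fun e => ownSpec e final)).min? = firstOverlapA c final 0 := by
  induction final with
  | nil => simp [ownSpec, firstOverlapA]
  | cons f rest ih =>
    by_cases h : ∃ e ∈ c, e ∈ f
    · have hA : firstOverlapA c (f :: rest) 0 = some 0 := by
        simp only [firstOverlapA, if_pos ((overlap_iff c f).2 h)]
      rw [hA]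
      obtain ⟨e, he, hef⟩ := h
      refine min?_zero _ (List.mem_filterMap.2 ⟨e, he, ?_⟩)
      simp [ownSpec, hef]
    · have hA : firstOverlapA c (f :: rest) 0 = (firstOverlapA c rest 0).map (· + 1) := by
        rw [firstOverlapA, if_neg (by rw [overlap_iff]; exact h)]
        exact firstOverlapA_shift c rest 1
      rw [hA, ← ih, ← min?_map_succ, ← filterMap_map_succ]
      apply congrArg
      apply List.filterMap_congr
      intro e he
      have : e ∉ f := fun hef => h ⟨e, he, hef⟩
      simp [ownSpec, this]

theorem ownSpec_lt_length (e : Int) (final : List (List Int)) (i : Nat)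
    (h : ownSpec e final = some i) : i < final.length := by
  induction final generalizing i with
  | nil => simp [ownSpec] at h
  | cons f rest ih =>
    by_cases hf : e ∈ f
    · simp [ownSpec, hf] at h; simp; omega
    · simp only [ownSpec, if_neg hf] at h
      cases hr : ownSpec e rest with
      | none => rw [hr] at h; simp at h
      | some j => rw [hr] at h; simp at h; have := ih j hr; simp; omega

theorem ownSpec_none_not_mem (e : Int) (final : List (List Int))
    (h : ownSpec e final = none) : ∀ j, (hj : j < final.length) → e ∉ final[j] := by
  induction final with
  | nil => intro j hj; simp at hj
  | cons f rest ih =>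
    by_cases hf : e ∈ f
    · simp [ownSpec, hf] at h
    · simp only [ownSpec, if_neg hf] at h
      intro j hj
      cases j with
      | zero => simpa using hf
      | succ j => exact ih (by simpa using h) j (by simpa using hj)

theorem ownSpec_some_not_mem_lt (e : Int) (final : List (List Int)) (i : Nat)
    (h : ownSpec e final = some i) : ∀ j, (hj : j < final.length) → j < i → e ∉ final[j] := by
  induction final generalizing i with
  | nil => intro j hj; simp at hj
  | cons f rest ih =>
    by_cases hf : e ∈ f
    · simp [ownSpec, hf] at h
      intro j hj hji
      omega
    · simp only [ownSpec, if_neg hf] at h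
      cases hr : ownSpec e rest with
      | none => rw [hr] at h; simp at h
      | some k =>
        rw [hr] at h; simp at h
        intro j hj hji
        cases j with
        | zero => simpa using hf
        | succ j => exact ih k hr j (by simpa using hj) (by omega)

theorem ownSpec_set_not (e : Int) (final : List (List Int)) (i : Nat) (u : List Int)
    (h : ∀ (hi : i < final.length), (e ∈ u ↔ e ∈ final[i])) :
    ownSpec e (final.set i u) = ownSpec e final := by
  induction final generalizing i with
  | nil => rfl
  | cons f rest ih =>
    cases i with
    | zero =>
      have h0 := h (by simp)
      simp only [List.set_cons_zero, ownSpec]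
      by_cases hu : e ∈ u
      · rw [if_pos hu, if_pos (by simpa using h0.1 hu)]
      · rw [if_neg hu, if_neg (by intro hf; exact hu (h0.2 (by simpa using hf)))]
    | succ i =>
      simp only [List.set_cons_succ, ownSpec]
      rw [ih i (fun hi => by simpa using h (by simpa using Nat.succ_lt_succ hi))]

theorem ownSpec_set_true (e : Int) (final : List (List Int)) (i : Nat) (u : List Int)
    (hi : i < final.length) (hu : e ∈ u)
    (hlow : ∀ j, (hj : j < final.length) → j < i → e ∉ final[j]) :
    ownSpec e (final.set i u) = some i := by
  induction final generalizing i with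
  | nil => simp at hi
  | cons f rest ih =>
    cases i with
    | zero => simp [ownSpec, hu]
    | succ i =>
      have hf : e ∉ f := hlow 0 (by simp) (by omega)
      simp only [List.set_cons_succ, ownSpec, if_neg hf]
      rw [ih i (by simpa using hi) (fun j hj hji => by
        simpa using hlow (j + 1) (by simpa using Nat.succ_lt_succ hj) (by omega))]
      rfl

theorem ownSpec_append (e : Int) (final : List (List Int)) (c : List Int) :
    ownSpec e (final ++ [c]) =
      match ownSpec e final with
      | some j => some j
      | none => if e ∈ c then some final.length else none := by
  induction final with
  | nil => by_cases h : e ∈ c <;> simp [ownSpec, h]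
  | cons f rest ih =>
    by_cases hf : e ∈ f
    · simp [ownSpec, hf]
    · simp only [List.cons_append, ownSpec, if_neg hf, ih]
      cases ownSpec e rest with
      | some j => simp
      | none => by_cases h : e ∈ c <;> simp [h]

theorem get?_foldl_setdefault (c : List Int) (o : PySem.Dict Int Nat) (k : Nat) (x : Int) :
    (c.foldl (fun o e => o.setdefault e k) o).get? x =
      if x ∈ c then some ((o.get? x).getD k) else o.get? x := by
  induction c generalizing o with
  | nil => simp
  | cons e rest ih =>
    simp only [List.foldl_cons, ih]
    by_cases hx : x ∈ rest
    · rw [if_pos hx, if_pos (by simp [hx])]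
      by_cases hxe : x = e
      · subst hxe; rw [PySem.Dict.get?_setdefault_self]; simp
      · rw [PySem.Dict.get?_setdefault_of_ne _ _ hxe]
    · rw [if_neg hx]
      by_cases hxe : x = e
      · subst hxe
        rw [if_pos (by simp), PySem.Dict.get?_setdefault_self]
      · rw [if_neg (by simp [hx, hxe]), PySem.Dict.get?_setdefault_of_ne _ _ hxe]

theorem get?_foldl_ownMinUpd (c : List Int) (o : PySem.Dict Int Nat) (i : Nat) (x : Int) :
    (c.foldl (ownMinUpd i) o).get? x =
      if x ∈ c then
        some ((o.get? x).elim i (fun j => if i < j then i else j))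
      else o.get? x := by
  induction c generalizing o with
  | nil => simp
  | cons e rest ih =>
    simp only [List.foldl_cons, ih]
    have hstep : ∀ y, y ≠ e → (ownMinUpd i o e).get? y = o.get? y := by
      intro y hy
      unfold ownMinUpd
      cases hoe : o.get? e with
      | none => exact PySem.Dict.get?_insert_of_ne _ _ hy
      | some j =>
        by_cases hij : i < j
        · simp only [if_pos hij]; exact PySem.Dict.get?_insert_of_ne _ _ hy
        · simp [hij]
    have hself : (ownMinUpd i o e).get? e =
        some ((o.get? e).elim i (fun j => if i < j then i else j)) := by
      unfold ownMinUpd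
      cases hoe : o.get? e with
      | none => simp [PySem.Dict.get?_insert_self]
      | some j =>
        by_cases hij : i < j
        · simp [hij, PySem.Dict.get?_insert_self]
        · simp [hoe, hij]
    by_cases hx : x ∈ rest
    · rw [if_pos hx, if_pos (by simp [hx])]
      by_cases hxe : x = e
      · subst hxe; rw [hself]
        cases o.get? x with
        | none => simp
        | some j => by_cases hij : i < j <;> simp [hij]
      · rw [hstep x hxe]
    · rw [if_neg hx]
      by_cases hxe : x = e
      · subst hxe; rw [if_pos (by simp), hself]
      · rw [if_neg (by simp [hx, hxe]), hstep x hxe]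

theorem inv_append (c : PySem.Set Int) (final : List (List Int)) (o : PySem.Dict Int Nat)
    (hInv : OwnInv final o) (hnone : ∀ e ∈ c, ownSpec e final = none) :
    OwnInv (final ++ [c]) (c.foldl (fun o e => o.setdefault e final.length) o) := by
  intro x
  rw [get?_foldl_setdefault, ownSpec_append, hInv x]
  by_cases hx : x ∈ c
  · rw [if_pos hx, hnone x hx]
    simp [hx]
  · rw [if_neg hx]
    cases ownSpec x final with
    | some j => simp
    | none => simp [hx]

theorem mem_min?_facts (c : PySem.Set Int) (final : List (List Int)) (i : Nat)
    (hmin : (c.filterMap (fun e => ownSpec e final)).min? = some i) :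
    (∃ e ∈ c, ownSpec e final = some i) ∧
      (∀ e ∈ c, ∀ j, ownSpec e final = some j → i ≤ j) := by
  rw [List.min?_eq_some_iff] at hmin
  obtain ⟨hmem, hle⟩ := hmin
  refine ⟨List.mem_filterMap.1 hmem, fun e he j hj => ?_⟩
  exact hle j (List.mem_filterMap.2 ⟨e, he, hj⟩)

theorem inv_merge (c : PySem.Set Int) (final : List (List Int)) (o : PySem.Dict Int Nat)
    (i : Nat) (hInv : OwnInv final o)
    (hmin : (c.filterMap (fun e => ownSpec e final)).min? = some i) :
    OwnInv (final.set i (PySem.Set.union c (final.getD i [])))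
      (c.foldl (ownMinUpd i) o) := by
  obtain ⟨⟨e0, he0, he0i⟩, hminle⟩ := mem_min?_facts c final i hmin
  have hi : i < final.length := ownSpec_lt_length e0 final i he0i
  have hgetD : final.getD i [] = final[i] := List.getD_eq_getElem final [] hi
  intro x
  rw [get?_foldl_ownMinUpd, hInv x]
  by_cases hx : x ∈ c
  · rw [if_pos hx]
    have hxu : x ∈ PySem.Set.union c (final.getD i []) := (PySem.Set.mem_union _ _ _).2 (Or.inl hx)
    cases hxs : ownSpec x final with
    | none =>
      rw [ownSpec_set_true x final i _ hi hxu
        (fun j hj _ => ownSpec_none_not_mem x final hxs j hj)]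
      simp
    | some j =>
      have hij : i ≤ j := hminle x hx j hxs
      rw [ownSpec_set_true x final i _ hi hxu
        (fun j' hj' hj'i => ownSpec_some_not_mem_lt x final j hxs j' hj' (by omega))]
      by_cases h2 : i < j
      · simp [h2]
      · have : j = i := by omega
        simp [this]
  · rw [if_neg hx]
    rw [ownSpec_set_not x final i _ (fun hi' => ?_)]
    rw [hgetD]
    constructor
    · intro hxu
      rcases (PySem.Set.mem_union _ _ _).1 hxu with h | h
      · exact absurd h hx
      · exact h
    · intro hmem
      exact (PySem.Set.mem_union _ _ _).2 (Or.inr hmem)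

theorem step_sim (final : List (List Int)) (o : PySem.Dict Int Nat) (circuit : List Int)
    (hInv : OwnInv final o) :
    (stepB (final, o) circuit).1 = stepA final circuit ∧
      OwnInv (stepA final circuit) ((stepB (final, o) circuit).2) := by
  have hidxs : (PySem.Set.ofList circuit).filterMap (fun e => o.get? e) =
      (PySem.Set.ofList circuit).filterMap (fun e => ownSpec e final) := by
    apply List.filterMap_congr
    intro e _
    exact hInv e
  unfold stepA stepB
  simp only [hidxs, key_min]
  cases hF : firstOverlapA (PySem.Set.ofList circuit) final 0 with
  | none =>
    refine ⟨rfl, ?_⟩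
    apply inv_append _ _ _ hInv
    intro e he
    have hnil : (PySem.Set.ofList circuit).filterMap (fun e => ownSpec e final) = [] :=
      List.min?_eq_none_iff.1 (by rw [key_min, hF])
    by_contra hne
    cases hs : ownSpec e final with
    | none => exact hne hs
    | some j =>
      have : j ∈ (PySem.Set.ofList circuit).filterMap (fun e => ownSpec e final) :=
        List.mem_filterMap.2 ⟨e, he, hs⟩
      rw [hnil] at this
      simp at this
  | some i =>
    refine ⟨rfl, ?_⟩
    apply inv_merge _ _ _ _ hInv
    rw [key_min, hF]

theorem foldl_sim (circuits : List (List Int)) (final : List (List Int))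
    (o : PySem.Dict Int Nat) (hInv : OwnInv final o) :
    (circuits.foldl stepB (final, o)).1 = circuits.foldl stepA final := by
  induction circuits generalizing final o with
  | nil => rfl
  | cons circuit rest ih =>
    obtain ⟨h1, h2⟩ := step_sim final o circuit hInv
    simp only [List.foldl_cons]
    have : stepB (final, o) circuit = (stepA final circuit, (stepB (final, o) circuit).2) := by
      rw [← h1]
    rw [this]
    exact ih _ _ h2

-- ===== VERDICT (by name: the statement is the Claim_ definition above) =====
theorem merge_circuits_spec : Claim_equal_merge_circuits := by
  intro circuits _
  unfold Spec_merge_circuits merge_circuits merge_circuits_alt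
  exact (foldl_sim circuits [] PySem.Dict.empty (fun e => by simp [ownSpec])).symm
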